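-- pv_equiv track=rewrite | github.com/hwtp/EDITS | distillation/gen_prototype.py | find_max_word_sentence
-- ===== SOURCE A (Python) =====
-- def find_max_word_sentence(word_weight_pairs, sen):
--     max_score = 0
--     max_sentence = ""
--
--     for sentence in sen:
--         score = sum(weight for w, weight in word_weight_pairs if w in sentence)
--
--         if score > max_score:
--             max_score = score
--             max_sentence = sentence
--
--     return max_sentence, max_score
-- ===== SOURCE B (Python) =====
-- def find_max_word_sentence(word_weight_pairs, sen):
--     # Transposed traversal: fold over the (word, weight) pairs once, accumulating
--     # per-sentence scores in place, then do a single argmax scan over the scores.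
--     scores = [0] * len(sen)
--     for w, weight in word_weight_pairs:
--         for i, sentence in enumerate(sen):
--             if w in sentence:
--                 scores[i] += weight
--     best, best_score = "", 0
--     for sentence, score in zip(sen, scores):
--         if score > best_score:
--             best, best_score = sentence, score
--     return best, best_score
-- ===== Notes on version B (the rewrite author's own statement) =====
-- stated objective: alternative
-- what changed: B transposes the two loops: instead of scanning all word-weight pairs per sentence with a generator sum and a running max, it folds over the pairs once, maintaining a vector of per-sentence scores, and then does a single argmax scan over (sentence, score) pairs.
import Mathlib
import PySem

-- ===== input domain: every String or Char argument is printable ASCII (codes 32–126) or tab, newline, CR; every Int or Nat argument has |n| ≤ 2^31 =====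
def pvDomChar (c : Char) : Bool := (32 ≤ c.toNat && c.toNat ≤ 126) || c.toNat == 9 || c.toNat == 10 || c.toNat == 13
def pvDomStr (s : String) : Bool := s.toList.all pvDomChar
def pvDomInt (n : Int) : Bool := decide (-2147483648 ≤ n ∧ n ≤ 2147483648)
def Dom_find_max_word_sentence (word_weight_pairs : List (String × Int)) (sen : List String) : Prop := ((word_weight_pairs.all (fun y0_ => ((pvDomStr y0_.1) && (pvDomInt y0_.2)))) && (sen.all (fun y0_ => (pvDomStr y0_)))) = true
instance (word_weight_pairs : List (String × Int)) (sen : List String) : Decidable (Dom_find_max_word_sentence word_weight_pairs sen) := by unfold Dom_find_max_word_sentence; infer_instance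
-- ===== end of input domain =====

-- B transposes the traversal (pair-major score accumulation into a score vector + a final argmax scan)
-- as an alternative decomposition of the same cost; the return value is proved equal.

-- ===== PORT A =====
-- sum(weight for w, weight in word_weight_pairs if w in sentence)
def pvAScore (word_weight_pairs : List (String × Int)) (sentence : String) : Int :=
  word_weight_pairs.foldl (fun acc p => if PySem.Str.isIn p.1 sentence then acc + p.2 else acc) 0

def find_max_word_sentence (word_weight_pairs : List (String × Int)) (sen : List String) : String × Int :=
  sen.foldl (fun (st : String × Int) sentence =>
      let score := pvAScore word_weight_pairs sentence
      if score > st.2 then (sentence, score) else st) ("", 0)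

-- ===== PORT B =====
-- inner loop 'for i, sentence in enumerate(sen): if w in sentence: scores[i] += weight';
-- the enumerate index p.1 is a nonnegative in-range index into scores (|scores| = |sen|),
-- so '.toNat' + List.set / List.getD are exact for Python's scores[i] += weight here.
def pvBPass (scores : List Int) (sen : List String) (w : String) (weight : Int) : List Int :=
  (PySem.List.enumerate sen 0).foldl
    (fun sc p => if PySem.Str.isIn w p.2 then sc.set p.1.toNat (sc.getD p.1.toNat 0 + weight) else sc)
    scores

def find_max_word_sentence_alt (word_weight_pairs : List (String × Int)) (sen : List String) : String × Int :=
  let scores := word_weight_pairs.foldl (fun sc p => pvBPass sc sen p.1 p.2)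
      (List.replicate sen.length 0)
  (sen.zip scores).foldl (fun (st : String × Int) p =>
      if p.2 > st.2 then (p.1, p.2) else st) ("", 0)

-- ===== PRECONDITION & SPEC =====
def Spec_find_max_word_sentence (word_weight_pairs : List (String × Int)) (sen : List String) (out : String × Int) : Prop := out = find_max_word_sentence_alt word_weight_pairs sen
instance (word_weight_pairs : List (String × Int)) (sen : List String) (out : String × Int) : Decidable (Spec_find_max_word_sentence word_weight_pairs sen out) := by unfold Spec_find_max_word_sentence; infer_instance

-- ===== CLAIM (what is proved, stated in full; the proofs are below) =====
def Claim_equal_find_max_word_sentence : Prop := ∀ (word_weight_pairs : List (String × Int)) (sen : List String), Dom_find_max_word_sentence word_weight_pairs sen → Spec_find_max_word_sentence word_weight_pairs sen (find_max_word_sentence word_weight_pairs sen)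

-- ===== LEMMAS AND PROOFS =====

-- the enumerate fold over a score vector of the form 'pre ++ sen.map g' updates the map pointwise
lemma pvBPass_aux (w : String) (weight : Int) (sen : List String) :
    ∀ (pre : List Int) (g : String → Int),
    (PySem.List.enumerate sen (pre.length : Int)).foldl
      (fun sc p => if PySem.Str.isIn w p.2 then sc.set p.1.toNat (sc.getD p.1.toNat 0 + weight) else sc)
      (pre ++ sen.map g)
    = pre ++ sen.map (fun s => if PySem.Str.isIn w s then g s + weight else g s) := by
  induction sen with
  | nil => intro pre g; simp [PySem.List.enumerate_nil]
  | cons s rest ih =>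
      intro pre g
      rw [PySem.List.enumerate_cons, List.foldl_cons]
      by_cases h : PySem.Str.isIn w s = true
      · simp only [List.map_cons, if_pos h]
        have hget : (pre ++ g s :: rest.map g).getD ((pre.length : Int)).toNat 0 = g s := by
          simp [List.getD_eq_getElem?_getD]
        have hst : (pre ++ g s :: rest.map g).set ((pre.length : Int)).toNat (g s + weight)
            = (pre ++ [g s + weight]) ++ rest.map g := by
          simp
        rw [hget, hst]
        have hlen : ((pre ++ [g s + weight]).length : Int) = (pre.length : Int) + 1 := by simp
        rw [← hlen, ih (pre ++ [g s + weight]) g]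
        simp
      · simp only [List.map_cons, if_neg h]
        have hrw : pre ++ g s :: rest.map g = (pre ++ [g s]) ++ rest.map g := by simp
        rw [hrw]
        have hlen : ((pre ++ [g s]).length : Int) = (pre.length : Int) + 1 := by simp
        rw [← hlen, ih (pre ++ [g s]) g]
        simp

-- one pvBPass on 'sen.map g' is a pointwise update
lemma pvBPass_map (g : String → Int) (sen : List String) (w : String) (weight : Int) :
    pvBPass (sen.map g) sen w weight
      = sen.map (fun s => if PySem.Str.isIn w s then g s + weight else g s) := by
  have := pvBPass_aux w weight sen [] g
  simpa [pvBPass] using this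

-- folding all pairs over 'sen.map g' accumulates A's per-sentence score pointwise
lemma pvScores_fold (word_weight_pairs : List (String × Int)) (sen : List String) (g : String → Int) :
    word_weight_pairs.foldl (fun sc p => pvBPass sc sen p.1 p.2) (sen.map g)
      = sen.map (fun s => word_weight_pairs.foldl
          (fun acc p => if PySem.Str.isIn p.1 s then acc + p.2 else acc) (g s)) := by
  induction word_weight_pairs generalizing g with
  | nil => simp
  | cons p rest ih =>
      simp only [List.foldl_cons, pvBPass_map]
      exact ih (fun s => if PySem.Str.isIn p.1 s then g s + p.2 else g s)

-- the final scan over zip (sen, sen.map f) is A's running-max fold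
lemma pvScan_zip_map (f : String → Int) (sen : List String) (st : String × Int) :
    (sen.zip (sen.map f)).foldl (fun (st : String × Int) p =>
        if p.2 > st.2 then (p.1, p.2) else st) st
      = sen.foldl (fun (st : String × Int) s =>
        if f s > st.2 then (s, f s) else st) st := by
  induction sen generalizing st with
  | nil => rfl
  | cons s rest ih => simp only [List.map_cons, List.zip_cons_cons, List.foldl_cons]; exact ih _

-- ===== VERDICT (by name: the statement is the Claim_ definition above) =====
theorem find_max_word_sentence_spec : Claim_equal_find_max_word_sentence := by
  intro pairs sen _
  show _ = _
  unfold find_max_word_sentence find_max_word_sentence_alt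
  have hrep : List.replicate sen.length (0 : Int) = sen.map (fun _ => 0) := by simp
  rw [hrep, pvScores_fold, pvScan_zip_map]
  rfl
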